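-- pv_equiv track=rewrite | github.com/clairemoorecantwell/GSR_Learning | Constraints.py | syllable_structure
-- ===== SOURCE A (Python) =====
-- def syllable_structure (root_form):
-- 	vowels = ['a', 'o', 'i', 'u', 'e']
-- 	syll_structure =[] #initialize list to store syll structure
--
-- 	for i in range (0,len(root_form)):
--
-- 		if root_form[i] in vowels: #found a vowel
-- 			if i==(len(root_form)-1): #last vowel -> L
-- 				syll_structure.append("L")
-- 			else:                     # not the last vowel
-- 				if root_form [i+1] == ":": # if its a long vowel -> H
-- 					syll_structure.append("H")
-- 				else:                     # short vowel ->L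
-- 					syll_structure.append("L")
--
-- 	syll_str_string = "".join(syll_structure) #join into a string
--
-- 	return syll_str_string
-- ===== SOURCE B (Python) =====
-- def syllable_structure(root_form):
--     # Split on ':' and tag each segment: a non-final segment ending in a vowel
--     # had its last vowel immediately before a colon -> 'H'; every other vowel -> 'L'.
--     segs = root_form.split(':')
--     out = []
--     for k, seg in enumerate(segs):
--         final = (k == len(segs) - 1)
--         tags = ['L' for c in seg if c in 'aoiue']
--         if not final and seg and seg[-1] in 'aoiue':
--             tags[-1] = 'H'
--         out.append(''.join(tags))
--     return ''.join(out)
-- ===== Notes on version B (the rewrite author's own statement) =====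
-- stated objective: alternative
-- what changed: Replaced A's per-index scan with a look-ahead test at every position by a staged algorithm: split the string on ':' and tag each segment in one pass (every vowel 'L', except the last vowel of a non-final segment that ends in a vowel, which sat immediately before a colon and becomes 'H').
import Mathlib
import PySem

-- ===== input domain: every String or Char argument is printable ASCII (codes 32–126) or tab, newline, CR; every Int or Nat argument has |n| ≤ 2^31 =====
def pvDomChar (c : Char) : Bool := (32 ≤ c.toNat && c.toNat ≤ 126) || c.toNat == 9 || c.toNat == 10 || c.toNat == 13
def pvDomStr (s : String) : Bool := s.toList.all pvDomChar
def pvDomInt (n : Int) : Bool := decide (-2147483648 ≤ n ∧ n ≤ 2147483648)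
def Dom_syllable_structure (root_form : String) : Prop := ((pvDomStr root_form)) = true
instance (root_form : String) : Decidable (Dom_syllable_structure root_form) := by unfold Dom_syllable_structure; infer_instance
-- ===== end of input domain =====

-- B replaces A's per-index look-ahead loop by a staged split-on-colon-then-tag-segments pass (same O(n); a timing run measured B faster by a constant factor).


-- ===== PORT A =====
-- A: for each index i in range(len), if the char is a vowel, look ahead at i+1 for ':'.
def syllable_structure (root_form : String) : String :=
  let vowels : List Char := ['a', 'o', 'i', 'u', 'e']
  let cs := root_form.toList
  let syll_structure :=
    (List.range cs.length).foldl (fun acc i =>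
      if cs.getD i ' ' ∈ vowels then
        if i == cs.length - 1 then acc ++ ["L"]
        else if cs.getD (i + 1) ' ' == ':' then acc ++ ["H"]
        else acc ++ ["L"]
      else acc) ([] : List String)
  PySem.Str.join "" syll_structure

-- ===== PORT B =====
-- B: split on ':', then tag each segment ('L' per vowel; the last vowel of a
-- non-final segment that ENDS in a vowel sat right before a colon -> 'H').
def segTags (seg : List Char) (final : Bool) : List String :=
  let tags := (seg.filter (· ∈ ['a', 'o', 'i', 'u', 'e'])).map (fun _ => "L")
  if final = false ∧ seg ≠ [] ∧ seg.getLast?.getD ' ' ∈ ['a', 'o', 'i', 'u', 'e'] then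
    tags.dropLast ++ ["H"]    -- tags[-1] = 'H'
  else tags

-- the enumerate loop: every segment but the last gets final := false
def tagSegs : List (List Char) → List String
  | [] => []
  | [s] => segTags s true
  | s :: t :: ss => segTags s false ++ tagSegs (t :: ss)

def syllable_structure_alt (root_form : String) : String :=
  PySem.Str.join "" (tagSegs (PySem.Chars.splitOn root_form.toList [':']))

-- ===== PRECONDITION & SPEC =====
def Spec_syllable_structure (root_form : String) (out : String) : Prop := out = syllable_structure_alt root_form
instance (root_form : String) (out : String) : Decidable (Spec_syllable_structure root_form out) := by unfold Spec_syllable_structure; infer_instance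

-- ===== CLAIM (what is proved, stated in full; the proofs are below) =====
def Claim_equal_syllable_structure : Prop := ∀ (root_form : String), Dom_syllable_structure root_form → Spec_syllable_structure root_form (syllable_structure root_form)

-- ===== LEMMAS AND PROOFS =====

-- Per-position contribution of A's loop, expressed structurally.
def sylSpec : List Char → List String
  | [] => []
  | c :: rest =>
    (if c ∈ ['a', 'o', 'i', 'u', 'e'] then
      [if rest.getD 0 ' ' == ':' then "H" else "L"] else []) ++ sylSpec rest

-- Per-index contribution of A's loop.
def sylH (cs : List Char) (i : Nat) : List String :=
  if cs.getD i ' ' ∈ ['a', 'o', 'i', 'u', 'e'] then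
    [if cs.getD (i + 1) ' ' == ':' then "H" else "L"] else []

lemma sylH_succ (c : Char) (rest : List Char) (i : Nat) :
    sylH (c :: rest) (i + 1) = sylH rest i := by
  simp [sylH]

lemma sylH_flatMap (cs : List Char) :
    (List.range cs.length).flatMap (sylH cs) = sylSpec cs := by
  induction cs with
  | nil => rfl
  | cons c rest ih =>
    have hcomp : sylH (c :: rest) ∘ Nat.succ = sylH rest := by
      funext i; exact sylH_succ c rest i
    calc (List.range (c :: rest).length).flatMap (sylH (c :: rest))
        = sylH (c :: rest) 0 ++
            ((List.range rest.length).map Nat.succ).flatMap (sylH (c :: rest)) := by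
          rw [List.length_cons, List.range_succ_eq_map, List.flatMap_cons]
      _ = sylH (c :: rest) 0 ++ (List.range rest.length).flatMap (sylH rest) := by
          rw [List.flatMap_map]
          simp only [Function.comp_def] at hcomp
          simp only [hcomp]
      _ = sylSpec (c :: rest) := by
          rw [ih]; cases rest <;> simp [sylH, sylSpec]

-- A's fold equals the flat accumulation of per-index contributions.
lemma sylA_loop (cs : List Char) :
    (List.range cs.length).foldl (fun acc i =>
      if cs.getD i ' ' ∈ ['a', 'o', 'i', 'u', 'e'] then
        if i == cs.length - 1 then acc ++ ["L"]
        else if cs.getD (i + 1) ' ' == ':' then acc ++ ["H"]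
        else acc ++ ["L"]
      else acc) ([] : List String)
    = sylSpec cs := by
  have hcongr :
      (List.range cs.length).foldl (fun acc i =>
        if cs.getD i ' ' ∈ ['a', 'o', 'i', 'u', 'e'] then
          if i == cs.length - 1 then acc ++ ["L"]
          else if cs.getD (i + 1) ' ' == ':' then acc ++ ["H"]
          else acc ++ ["L"]
        else acc) ([] : List String)
      = (List.range cs.length).foldl (fun acc i => acc ++ sylH cs i) ([] : List String) := by
    apply PySem.List.foldl_congr_mem
    intro acc i hi
    have hlt : i < cs.length := List.mem_range.mp hi
    by_cases hv : cs.getD i ' ' ∈ ['a', 'o', 'i', 'u', 'e']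
    · by_cases hlast : i = cs.length - 1
      · have hout : cs.length ≤ i + 1 := by omega
        have hsp : cs.getD (i + 1) ' ' = ' ' := List.getD_eq_default _ _ hout
        have hb : (i == cs.length - 1) = true := by simp [hlast]
        unfold sylH
        rw [if_pos hv, if_pos hv, if_pos hb, hsp, if_neg (by decide)]
      · have hb : ¬ ((i == cs.length - 1) = true) := by simp [hlast]
        unfold sylH
        rw [if_pos hv, if_pos hv, if_neg hb]
        split_ifs <;> rfl
    · unfold sylH
      rw [if_neg hv, if_neg hv, List.append_nil]
  rw [hcongr, PySem.List.foldl_append_eq_flatMap, List.nil_append, sylH_flatMap]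

-- Structural form of Python's split(':') used only in the proofs.
def splitColon : List Char → List (List Char)
  | [] => [[]]
  | c :: rest =>
    if c = ':' then [] :: splitColon rest
    else
      match splitColon rest with
      | [] => [[c]]
      | s :: ss => (c :: s) :: ss

lemma splitColon_ne_nil (cs : List Char) : splitColon cs ≠ [] := by
  cases cs with
  | nil => simp [splitColon]
  | cons c rest =>
    simp only [splitColon]
    split_ifs
    · simp
    · cases h : splitColon rest <;> simp

lemma splitOn_go_eq (fuel : Nat) :
    ∀ (l cur : List Char) (acc : List (List Char)), l.length ≤ fuel →
      PySem.Chars.splitOn.go [':'] fuel l cur acc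
        = acc.reverse ++ (splitColon l).modifyHead (cur.reverse ++ ·) := by
  induction fuel with
  | zero =>
    intro l cur acc h
    have : l = [] := List.length_eq_zero_iff.mp (Nat.le_zero.mp h)
    subst this
    simp [PySem.Chars.splitOn.go, splitColon]
  | succ f ih =>
    intro l cur acc h
    cases l with
    | nil => simp [PySem.Chars.splitOn.go, splitColon]
    | cons c rest =>
      by_cases hc : c = ':'
      · subst hc
        have hpre : (List.isPrefixOf [':'] (':' :: rest)) = true := by
          simp [List.isPrefixOf]
        rw [PySem.Chars.splitOn.go]
        simp only [hpre, if_true]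
        have hdrop : List.drop (List.length [':']) (':' :: rest) = rest := rfl
        rw [hdrop, ih rest [] ((cur.reverse) :: acc) (by simpa using Nat.lt_succ_iff.mp (by simpa using h))]
        simp [splitColon]
        cases splitColon rest <;> simp
      · have hc' : ¬ (':' = c) := fun h => hc h.symm
        have hpre : (List.isPrefixOf [':'] (c :: rest)) = false := by
          simp [List.isPrefixOf, hc']
        rw [PySem.Chars.splitOn.go]
        simp only [hpre, Bool.false_eq_true, if_false]
        rw [ih rest (c :: cur) acc (by simpa using Nat.lt_succ_iff.mp (by simpa using h))]
        simp only [splitColon, if_neg hc]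
        cases hs : splitColon rest with
        | nil => exact absurd hs (splitColon_ne_nil rest)
        | cons s ss => simp

lemma splitOn_eq_splitColon (cs : List Char) :
    PySem.Chars.splitOn cs [':'] = splitColon cs := by
  unfold PySem.Chars.splitOn
  rw [splitOn_go_eq (cs.length + 1) cs [] [] (by omega)]
  cases hs : splitColon cs with
  | nil => exact absurd hs (splitColon_ne_nil cs)
  | cons s ss => simp

lemma segTags_nil (fin : Bool) : segTags [] fin = [] := by
  simp [segTags]

lemma segTags_single (c : Char) (fin : Bool) :
    segTags [c] fin
      = if c ∈ ['a', 'o', 'i', 'u', 'e'] then (if fin = true then ["L"] else ["H"]) else [] := by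
  by_cases hv : c ∈ ['a', 'o', 'i', 'u', 'e']
  · fin_cases hv <;> cases fin <;> decide
  · have hv' : ¬c = 'a' ∧ ¬c = 'o' ∧ ¬c = 'i' ∧ ¬c = 'u' ∧ ¬c = 'e' := by simpa using hv
    cases fin <;> simp [segTags, hv, hv']

-- Peeling a leading char off a segment whose tail is nonempty.
lemma segTags_cons (c : Char) (t : List Char) (fin : Bool) (ht : t ≠ []) :
    segTags (c :: t) fin
      = (if c ∈ ['a', 'o', 'i', 'u', 'e'] then ["L"] else []) ++ segTags t fin := by
  obtain ⟨x, xs, rfl⟩ := List.exists_cons_of_ne_nil ht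
  have hmap : ((c :: x :: xs).filter (· ∈ ['a', 'o', 'i', 'u', 'e'])).map (fun _ => ("L" : String))
      = (if c ∈ ['a', 'o', 'i', 'u', 'e'] then ["L"] else [])
        ++ ((x :: xs).filter (· ∈ ['a', 'o', 'i', 'u', 'e'])).map (fun _ => ("L" : String)) := by
    by_cases hc : c ∈ ['a', 'o', 'i', 'u', 'e']
    · have hcd : c = 'a' ∨ c = 'o' ∨ c = 'i' ∨ c = 'u' ∨ c = 'e' := by simpa using hc
      rcases hcd with rfl | rfl | rfl | rfl | rfl <;> simp [List.filter_cons]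
    · have hcd : ¬c = 'a' ∧ ¬c = 'o' ∧ ¬c = 'i' ∧ ¬c = 'u' ∧ ¬c = 'e' := by simpa using hc
      simp [List.filter_cons, hc, hcd]
  have hlast : (c :: x :: xs).getLast?.getD ' ' = (x :: xs).getLast?.getD ' ' := by
    rw [List.getLast?_cons_cons]
  simp only [segTags, hmap, hlast]
  by_cases hcond : fin = false ∧ (x :: xs : List Char) ≠ [] ∧
      (x :: xs).getLast?.getD ' ' ∈ ['a', 'o', 'i', 'u', 'e']
  · have hcond' : fin = false ∧ (c :: x :: xs : List Char) ≠ [] ∧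
        (x :: xs).getLast?.getD ' ' ∈ ['a', 'o', 'i', 'u', 'e'] := ⟨hcond.1, by simp, hcond.2.2⟩
    rw [if_pos hcond', if_pos hcond]
    -- the tail's tag list is nonempty: its last char is a vowel, hence filtered in
    have hne : ((x :: xs).filter (· ∈ ['a', 'o', 'i', 'u', 'e'])).map
        (fun _ => ("L" : String)) ≠ [] := by
      have hv := hcond.2.2
      obtain ⟨v, hvlast⟩ := List.getLast?_isSome.mpr (show (x :: xs : List Char) ≠ [] by simp)
        |> Option.isSome_iff_exists.mp
      rw [hvlast] at hv
      simp only [Option.getD_some] at hv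
      have hvm : v ∈ (x :: xs : List Char) := List.mem_of_getLast? hvlast
      have : v ∈ (x :: xs).filter (· ∈ ['a', 'o', 'i', 'u', 'e']) :=
        List.mem_filter.mpr ⟨hvm, by simpa using hv⟩
      intro hnil
      rw [List.map_eq_nil_iff] at hnil
      rw [hnil] at this
      exact (List.not_mem_nil) this
    by_cases hc : c ∈ ['a', 'o', 'i', 'u', 'e']
    · rw [if_pos hc, List.singleton_append, List.dropLast_cons_of_ne_nil hne]
      simp
    · rw [if_neg hc]; simp
  · have hcond' : ¬ (fin = false ∧ (c :: x :: xs : List Char) ≠ [] ∧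
        (x :: xs).getLast?.getD ' ' ∈ ['a', 'o', 'i', 'u', 'e']) := by
      intro ⟨h1, _, h3⟩
      exact hcond ⟨h1, by simp, h3⟩
    rw [if_neg hcond', if_neg hcond]

-- tagSegs over any cons peels the head segment's leading char alike.
lemma tagSegs_cons_peel (c : Char) (t : List Char) (ss : List (List Char)) (ht : t ≠ []) :
    tagSegs ((c :: t) :: ss)
      = (if c ∈ ['a', 'o', 'i', 'u', 'e'] then ["L"] else []) ++ tagSegs (t :: ss) := by
  cases ss with
  | nil => simp [tagSegs, segTags_cons c t true ht]
  | cons e es => simp [tagSegs, segTags_cons c t false ht]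

-- head of splitColon keeps a leading non-colon char
lemma splitColon_cons_ne (d : Char) (rest : List Char) (hd : d ≠ ':') :
    ∃ s ss, splitColon rest = s :: ss ∧ splitColon (d :: rest) = (d :: s) :: ss := by
  cases hs : splitColon rest with
  | nil => exact absurd hs (splitColon_ne_nil rest)
  | cons s ss =>
    refine ⟨s, ss, rfl, ?_⟩
    simp [splitColon, if_neg hd, hs]

-- induction skeleton for the main lemma
def mainRec : List Char → Unit
  | [] => ()
  | ':' :: rest => mainRec rest
  | [_] => ()
  | _ :: ':' :: rest2 => mainRec rest2
  | _ :: d :: rest2 => mainRec (d :: rest2)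

lemma tagSegs_splitColon (cs : List Char) : tagSegs (splitColon cs) = sylSpec cs := by
  induction cs using mainRec.induct with
  | case1 => simp [splitColon, tagSegs, segTags, sylSpec]
  | case2 rest ih =>
    simp only [splitColon]
    cases hs : splitColon rest with
    | nil => exact absurd hs (splitColon_ne_nil rest)
    | cons s ss =>
      rw [hs] at ih
      simp [tagSegs, segTags_nil, sylSpec, ih]
  | case3 c hc =>
    have h1 : splitColon [c] = [[c]] := by simp [splitColon, if_neg hc]
    rw [h1]
    have h2 : tagSegs [[c]] = segTags [c] true := by simp [tagSegs]
    rw [h2, segTags_single]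
    by_cases hv : c ∈ ['a', 'o', 'i', 'u', 'e']
    · simp [sylSpec, hv]
    · simp [sylSpec, hv]
  | case4 c rest2 hc ih =>
    have h1 : splitColon (c :: ':' :: rest2) = [c] :: splitColon rest2 := by
      simp [splitColon, if_neg hc]
    rw [h1]
    cases hs : splitColon rest2 with
    | nil => exact absurd hs (splitColon_ne_nil rest2)
    | cons s ss =>
      rw [hs] at ih
      have h2 : tagSegs ([c] :: s :: ss) = segTags [c] false ++ tagSegs (s :: ss) := by
        simp [tagSegs]
      rw [h2, ih, segTags_single]
      by_cases hv : c ∈ ['a', 'o', 'i', 'u', 'e']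
      · simp [sylSpec, hv]
      · simp [sylSpec, hv]
  | case5 c d rest2 hc hd ih =>
    obtain ⟨s, ss, hs, hds⟩ := splitColon_cons_ne d rest2 hd
    have h1 : splitColon (c :: d :: rest2) = (c :: d :: s) :: ss := by
      simp only [splitColon, if_neg hc, if_neg hd, hs]
    rw [h1, tagSegs_cons_peel c (d :: s) ss (by simp), ← hds, ih]
    have hdne : (d == ':') = false := by simpa using hd
    by_cases hv : c ∈ ['a', 'o', 'i', 'u', 'e']
    · simp [sylSpec, hv, hdne]
    · simp [sylSpec, hv]

-- ===== VERDICT (by name: the statement is the Claim_ definition above) =====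
theorem syllable_structure_spec : Claim_equal_syllable_structure := by
  intro root_form _
  unfold Spec_syllable_structure syllable_structure syllable_structure_alt
  simp only [sylA_loop, splitOn_eq_splitColon, tagSegs_splitColon]
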